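-- pv_equiv track=rewrite | github.com/LucyLeary/CS-1400 | Lab11.py | translate_to_pirate
-- ===== SOURCE A (Python) =====
-- def translate_pirate_word(english_word):
--     if english_word == "my":
--         return "me"
--     elif english_word == "you":
--         return "ye"
--     elif english_word == "is" or english_word == "are":
--         return "be"
--     elif english_word == "hello":
--         return "ahoy"
--     elif english_word == "yes":
--         return "arr"
--     elif english_word == "friend":
--         return "matey"
--     else:
--         return english_word
--
-- def translate_to_pirate(english_sentence):
--     english_sentence += " "
--     word = ""
--     pirate_sentence = ""
--     for character in english_sentence:
--         if character != " ":
--             word += character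
--         else:
--             pirate_sentence += translate_pirate_word(word) + " "
--             word = ""
--     return pirate_sentence[0: -1]
-- ===== SOURCE B (Python) =====
-- def translate_to_pirate(english_sentence):
--     d = {'my': 'me', 'you': 'ye', 'is': 'be', 'are': 'be',
--          'hello': 'ahoy', 'yes': 'arr', 'friend': 'matey'}
--     return ' '.join(d.get(w, w) for w in english_sentence.split(' '))
-- ===== Notes on version B (the rewrite author's own statement) =====
-- stated objective: idiomatic
-- what changed: A scans the sentence character by character maintaining a word buffer and a growing output string; B tokenizes once with str.split on the space separator, maps each word through a dict literal via d.get(w, w), and joins the results back with the space separator.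
import Mathlib
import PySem

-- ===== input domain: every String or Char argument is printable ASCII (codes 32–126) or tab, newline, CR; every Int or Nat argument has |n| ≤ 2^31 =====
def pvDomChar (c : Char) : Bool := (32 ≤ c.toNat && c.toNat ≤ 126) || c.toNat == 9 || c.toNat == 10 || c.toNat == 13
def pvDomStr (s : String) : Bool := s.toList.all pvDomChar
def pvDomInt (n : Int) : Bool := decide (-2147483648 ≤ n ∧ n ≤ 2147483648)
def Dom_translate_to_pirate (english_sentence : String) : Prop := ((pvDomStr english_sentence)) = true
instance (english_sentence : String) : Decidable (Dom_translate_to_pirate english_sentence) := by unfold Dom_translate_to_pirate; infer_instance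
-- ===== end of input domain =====

-- B replaces A's character-by-character scan with a word buffer by split(' ') / dict lookup / join(' ') — same result, more idiomatic decomposition.

-- ===== PORT A =====
-- A's helper 'translate_pirate_word': the elif chain, in order
def translate_pirate_word (w : List Char) : List Char :=
  if w = ['m','y'] then ['m','e']
  else if w = ['y','o','u'] then ['y','e']
  else if w = ['i','s'] ∨ w = ['a','r','e'] then ['b','e']
  else if w = ['h','e','l','l','o'] then ['a','h','o','y']
  else if w = ['y','e','s'] then ['a','r','r']
  else if w = ['f','r','i','e','n','d'] then ['m','a','t','e','y']
  else w

-- A's loop body over the state (word, pirate_sentence)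
def pirateStep (st : List Char × List Char) (c : Char) : List Char × List Char :=
  if c ≠ ' ' then (st.1 ++ [c], st.2)
  else ([], st.2 ++ translate_pirate_word st.1 ++ [' '])

def translate_to_pirate (english_sentence : String) : String :=
  let cs := english_sentence.toList ++ [' ']        -- english_sentence += " "
  let st := cs.foldl pirateStep ([], [])
  String.ofList (PySem.Chars.slice st.2 (some 0) (some (-1)))  -- pirate_sentence[0:-1]

-- ===== PORT B =====
-- B's dict literal d
def pirateDict : PySem.Dict (List Char) (List Char) :=
  PySem.Dict.ofList
    [(['m','y'], ['m','e']), (['y','o','u'], ['y','e']), (['i','s'], ['b','e']),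
     (['a','r','e'], ['b','e']), (['h','e','l','l','o'], ['a','h','o','y']),
     (['y','e','s'], ['a','r','r']), (['f','r','i','e','n','d'], ['m','a','t','e','y'])]

-- ' '.join(d.get(w, w) for w in english_sentence.split(' '))
def translate_to_pirate_alt (english_sentence : String) : String :=
  String.ofList (PySem.Chars.join [' ']
    ((PySem.Chars.splitOn english_sentence.toList [' ']).map
      (fun w => pirateDict.getD w w)))

-- ===== PRECONDITION & SPEC =====
def Spec_translate_to_pirate (english_sentence : String) (out : String) : Prop := out = translate_to_pirate_alt english_sentence
instance (english_sentence : String) (out : String) : Decidable (Spec_translate_to_pirate english_sentence out) := by unfold Spec_translate_to_pirate; infer_instance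

-- ===== CLAIM (what is proved, stated in full; the proofs are below) =====
def Claim_equal_translate_to_pirate : Prop := ∀ (english_sentence : String), Dom_translate_to_pirate english_sentence → Spec_translate_to_pirate english_sentence (translate_to_pirate english_sentence)

-- ===== LEMMAS AND PROOFS =====

-- reference splitter for the single-space separator (proof-only)
def mysplit (cur : List Char) : List Char → List (List Char)
  | [] => [cur.reverse]
  | c :: rest => if c = ' ' then cur.reverse :: mysplit [] rest else mysplit (c :: cur) rest

theorem go_eq_mysplit (fuel : Nat) (l cur : List Char) (acc : List (List Char))
    (h : l.length < fuel) :
    PySem.Chars.splitOn.go [' '] fuel l cur acc = acc.reverse ++ mysplit cur l := by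
  induction fuel generalizing l cur acc with
  | zero => omega
  | succ fuel ih =>
    cases l with
    | nil => simp [PySem.Chars.splitOn.go, mysplit]
    | cons c rest =>
      by_cases hc : c = ' '
      · subst hc
        rw [PySem.Chars.splitOn.go]
        have hp : List.isPrefixOf [' '] (' ' :: rest) = true := by simp [List.isPrefixOf]
        rw [if_pos hp]
        simp only [List.length_cons, List.drop_succ_cons]
        rw [ih _ _ _ (by simp at h ⊢; omega)]
        simp [mysplit]
      · rw [PySem.Chars.splitOn.go]
        have hp : List.isPrefixOf [' '] (c :: rest) = false := by
          simp [List.isPrefixOf, Ne.symm hc]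
        rw [if_neg (by simp [hp])]
        rw [ih _ _ _ (by simp at h ⊢; omega)]
        simp [mysplit, hc]

theorem splitOn_eq_mysplit (l : List Char) :
    PySem.Chars.splitOn l [' '] = mysplit [] l := by
  rw [PySem.Chars.splitOn, go_eq_mysplit _ _ _ _ (by omega)]
  simp

theorem join_eq_dropLast_flatMap (parts : List (List Char)) :
    PySem.Chars.join [' '] parts =
      (parts.flatMap (fun w => w ++ [' '])).dropLast := by
  induction parts with
  | nil => simp [PySem.Chars.join, List.intercalate]
  | cons p ps ih =>
    cases ps with
    | nil => simp [PySem.Chars.join, List.intercalate]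
    | cons q ps' =>
      have hne : (List.flatMap (fun w => w ++ [' ']) (q :: ps')) ≠ [] := by
        simp [List.flatMap_cons]
      rw [List.flatMap_cons, List.dropLast_append_of_ne_nil hne, ← ih]
      simp [PySem.Chars.join, List.intercalate, List.intersperse]

theorem getD_eq_word (w : List Char) :
    pirateDict.getD w w = translate_pirate_word w := by
  by_cases h1 : w = ['m','y']; · subst h1; decide
  by_cases h2 : w = ['y','o','u']; · subst h2; decide
  by_cases h3 : w = ['i','s']; · subst h3; decide
  by_cases h4 : w = ['a','r','e']; · subst h4; decide
  by_cases h5 : w = ['h','e','l','l','o']; · subst h5; decide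
  by_cases h6 : w = ['y','e','s']; · subst h6; decide
  by_cases h7 : w = ['f','r','i','e','n','d']; · subst h7; decide
  have hi : pirateDict.items =
    [(['m','y'], ['m','e']), (['y','o','u'], ['y','e']), (['i','s'], ['b','e']),
     (['a','r','e'], ['b','e']), (['h','e','l','l','o'], ['a','h','o','y']),
     (['y','e','s'], ['a','r','r']), (['f','r','i','e','n','d'], ['m','a','t','e','y'])] := by decide
  have e1 : (['m','y'] == w) = false := beq_eq_false_iff_ne.mpr (Ne.symm h1)
  have e2 : (['y','o','u'] == w) = false := beq_eq_false_iff_ne.mpr (Ne.symm h2)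
  have e3 : (['i','s'] == w) = false := beq_eq_false_iff_ne.mpr (Ne.symm h3)
  have e4 : (['a','r','e'] == w) = false := beq_eq_false_iff_ne.mpr (Ne.symm h4)
  have e5 : (['h','e','l','l','o'] == w) = false := beq_eq_false_iff_ne.mpr (Ne.symm h5)
  have e6 : (['y','e','s'] == w) = false := beq_eq_false_iff_ne.mpr (Ne.symm h6)
  have e7 : (['f','r','i','e','n','d'] == w) = false := beq_eq_false_iff_ne.mpr (Ne.symm h7)
  simp [PySem.Dict.getD, PySem.Dict.get?, hi, List.find?, e1, e2, e3, e4, e5, e6, e7,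
    translate_pirate_word, h1, h2, h3, h4, h5, h6, h7]

theorem slice_zero_negone (l : List Char) :
    PySem.Chars.slice l (some 0) (some (-1)) = l.dropLast := by
  simp only [PySem.Chars.slice, PySem.List.slice, PySem.List.clampIdx]
  rcases l with _ | ⟨a, t⟩
  · simp
  · simp [List.dropLast_eq_take]
    split_ifs <;> omega

theorem main_inv (cs : List Char) (cur : List Char) (o : List Char) :
    (List.foldl pirateStep (cur.reverse, o) (cs ++ [' '])).2 =
      o ++ (mysplit cur cs).flatMap (fun w => translate_pirate_word w ++ [' ']) := by
  induction cs generalizing cur o with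
  | nil => simp [pirateStep, mysplit]
  | cons c rest ih =>
    by_cases hc : c = ' '
    · subst hc
      simp only [List.cons_append, List.foldl_cons]
      rw [show pirateStep (cur.reverse, o) ' ' =
            (([] : List Char), o ++ translate_pirate_word cur.reverse ++ [' ']) by
        simp [pirateStep]]
      have h2 := ih [] (o ++ translate_pirate_word cur.reverse ++ [' '])
      simp only [List.reverse_nil] at h2
      rw [h2]
      simp [mysplit, List.append_assoc]
    · simp only [List.cons_append, List.foldl_cons]
      rw [show pirateStep (cur.reverse, o) c = ((c :: cur).reverse, o) by
        simp [pirateStep, hc]]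
      rw [ih (c :: cur) o]
      simp [mysplit, hc]

-- ===== VERDICT (by name: the statement is the Claim_ definition above) =====
theorem translate_to_pirate_spec : Claim_equal_translate_to_pirate := by
  intro s _
  unfold Spec_translate_to_pirate translate_to_pirate translate_to_pirate_alt
  show String.ofList (PySem.Chars.slice
      (List.foldl pirateStep ([], []) (s.toList ++ [' '])).2 (some 0) (some (-1))) = _
  have h := main_inv s.toList [] []
  simp only [List.reverse_nil, List.nil_append] at h
  rw [h, slice_zero_negone, splitOn_eq_mysplit, join_eq_dropLast_flatMap]
  simp only [List.flatMap_def, List.map_map, Function.comp_def, getD_eq_word]
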